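-- pv_equiv track=rewrite | github.com/yesl-kim/algorithm-problem-solving | 프로그래머스/1/131705. 삼총사/삼총사.py | solution
-- ===== SOURCE A (Python) =====
-- from collections import defaultdict
-- from itertools import combinations
-- from bisect import bisect_right
--
-- def solution(numbers):
--     indices = defaultdict(list)
--     for i, n in enumerate(numbers):
--         indices[n].append(i)
--
--     def count_after(x, v):
--         arr = indices[x]
--         if not arr or arr[-1] <= v:
--             return 0
--
--         i = bisect_right(arr, v)
--         if len(arr) <= i:
--             return 0
--
--         return len(arr) - i
--
--
--     cnt = 0
--     for i, j in combinations(range(len(numbers)), 2):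
--         x = -(numbers[i] + numbers[j])
--         cnt += count_after(x, j)
--
--     return cnt
-- ===== SOURCE B (Python) =====
-- def solution(numbers):
--     n = len(numbers)
--     cnt = 0
--     for i in range(n):
--         for j in range(i + 1, n):
--             for k in range(j + 1, n):
--                 if numbers[i] + numbers[j] + numbers[k] == 0:
--                     cnt += 1
--     return cnt
-- ===== Notes on version B (the rewrite author's own statement) =====
-- stated objective: simpler
-- what changed: Replaced the per-value index map with bisect counting by a direct triple loop over index-ordered triples that counts those summing to zero.
import Mathlib
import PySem

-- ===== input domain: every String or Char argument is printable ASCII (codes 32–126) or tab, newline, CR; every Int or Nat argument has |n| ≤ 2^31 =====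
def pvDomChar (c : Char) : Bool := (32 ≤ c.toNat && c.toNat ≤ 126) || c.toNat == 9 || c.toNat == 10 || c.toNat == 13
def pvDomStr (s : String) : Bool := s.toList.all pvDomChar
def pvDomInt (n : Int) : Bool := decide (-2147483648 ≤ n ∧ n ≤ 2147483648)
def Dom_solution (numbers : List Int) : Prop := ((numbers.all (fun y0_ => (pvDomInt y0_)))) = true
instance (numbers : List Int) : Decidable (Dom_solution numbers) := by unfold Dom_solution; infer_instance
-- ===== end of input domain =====

-- B replaces A's per-value index map with bisect counting by a plain triple loop over
-- index-ordered triples that counts those summing to zero (simpler, not faster).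

-- ===== PORT A =====
-- count_after, the inner closure of A (takes the index dict explicitly);
-- `not arr or arr[-1] <= v` short-circuits, ported as two nested ifs with the same value
def countAfter (indices : PySem.Dict Int (List Int)) (x v : Int) : Int :=
  let arr := indices.getD x []
  if arr = [] then 0
  else if PySem.List.pyGetD arr (-1) 0 ≤ v then 0
  else
    let i := PySem.List.bisectRight arr v
    if arr.length ≤ i then 0
    else (arr.length : Int) - (i : Int)

def solution (numbers : List Int) : Int :=
  -- defaultdict(list) with indices[n].append(i) is Dict.modify with default []
  let indices : PySem.Dict Int (List Int) :=
    (PySem.List.enumerate numbers).foldl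
      (fun d p => d.modify p.2 [] (fun l => l ++ [p.1])) PySem.Dict.empty
  (PySem.List.combinations (PySem.List.pyRange 0 (PySem.List.len numbers)) 2).foldl
    (fun cnt c =>
      match c with
      | [i, j] =>
          cnt + countAfter indices
            (-(PySem.List.pyGetD numbers i 0 + PySem.List.pyGetD numbers j 0)) j
      | _ => cnt) 0

-- ===== PORT B =====
def solution_alt (numbers : List Int) : Int :=
  let n : Int := PySem.List.len numbers
  (PySem.List.pyRange 0 n).foldl (fun cnt i =>
    (PySem.List.pyRange (i + 1) n).foldl (fun cnt j =>
      (PySem.List.pyRange (j + 1) n).foldl (fun cnt k =>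
        if PySem.List.pyGetD numbers i 0 + PySem.List.pyGetD numbers j 0
             + PySem.List.pyGetD numbers k 0 = 0 then cnt + 1 else cnt) cnt) cnt) 0

-- ===== PRECONDITION & SPEC =====
def Spec_solution (numbers : List Int) (out : Int) : Prop := out = solution_alt numbers
instance (numbers : List Int) (out : Int) : Decidable (Spec_solution numbers out) := by unfold Spec_solution; infer_instance

-- ===== CLAIM (what is proved, stated in full; the proofs are below) =====
def Claim_equal_solution : Prop := ∀ (numbers : List Int), Dom_solution numbers → Spec_solution numbers (solution numbers)

-- ===== LEMMAS AND PROOFS =====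

theorem getD_buildIndices (numbers : List Int) (x : Int) :
    ((PySem.List.enumerate numbers).foldl
      (fun d p => d.modify p.2 [] (fun l => l ++ [p.1]))
      (PySem.Dict.empty : PySem.Dict Int (List Int))).getD x []
    = (PySem.List.pyRange 0 (PySem.List.len numbers)).filter
        (fun k => PySem.List.pyGetD numbers k 0 == x) := by
  have h1 : (PySem.List.enumerate numbers).foldl
      (fun d p => d.modify p.2 [] (fun l => l ++ [p.1]))
      (PySem.Dict.empty : PySem.Dict Int (List Int))
      = ((PySem.List.enumerate numbers).map Prod.swap).foldl
      (fun d q => d.modify q.1 [] (fun l => l ++ [q.2])) PySem.Dict.empty := by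
    rw [List.foldl_map]; rfl
  rw [h1, PySem.Dict.getD_foldl_modify_append,
    PySem.List.enumerate_eq_map_pyRange numbers 0]
  simp [List.map_map, List.filter_map, Function.comp_def]

theorem countP_gt_eq (arr : List Int) (v : Int) (hs : List.Pairwise (· ≤ ·) arr) :
    arr.countP (fun t => decide (v < t)) = arr.length - PySem.List.bisectRight arr v := by
  obtain ⟨hle, hbefore, hafter⟩ := PySem.List.bisectRight_spec arr v hs
  set i := PySem.List.bisectRight arr v with hi
  have h1 : (arr.take i).countP (fun t => decide (v < t)) = 0 := by
    rw [List.countP_eq_zero]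
    intro t ht
    obtain ⟨m, hm, rfl⟩ := List.getElem_of_mem ht
    simp only [List.length_take] at hm
    rw [List.getElem_take]
    have := hbefore m (by omega) (by omega)
    simpa using not_lt.mpr this
  have h2 : (arr.drop i).countP (fun t => decide (v < t)) = arr.length - i := by
    rw [List.countP_eq_length.mpr, List.length_drop]
    intro t ht
    obtain ⟨m, hm, rfl⟩ := List.getElem_of_mem ht
    simp only [List.length_drop] at hm
    rw [List.getElem_drop]
    exact decide_eq_true (hafter (i + m) (by omega) (by omega))
  calc arr.countP (fun t => decide (v < t))
      = (arr.take i ++ arr.drop i).countP (fun t => decide (v < t)) := by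
        rw [List.take_append_drop]
    _ = arr.length - i := by rw [List.countP_append, h1, h2, Nat.zero_add]

theorem pyGetD_neg_one (arr : List Int) (h : arr ≠ []) (h' : arr.length - 1 < arr.length) :
    PySem.List.pyGetD arr (-1) 0 = arr[arr.length - 1] := by
  have hlen : 1 ≤ arr.length := List.length_pos_iff.mpr h
  simp only [PySem.List.pyGetD, PySem.List.pyGet?, PySem.List.pyIdx?, Int.reduceNeg, Int.neg_nonneg,
    Int.reduceLE, reduceIte, neg_le_neg_iff, Nat.one_le_cast, neg_neg, Int.toNat_one]
  simp [hlen, List.getElem?_eq_getElem h']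

theorem pairwise_lt_filter_pyRange (numbers : List Int) (q : Int → Bool) :
    List.Pairwise (· < ·) (((PySem.List.pyRange 0 (PySem.List.len numbers)).filter q)) := by
  apply List.Pairwise.filter
  have h : PySem.List.pyRange 0 (PySem.List.len numbers)
      = (List.range numbers.length).map (fun (k : Nat) => (k : Int)) := by
    show PySem.List.pyRange 0 ((numbers.length : Nat) : Int) = _
    exact PySem.List.pyRange_zero_natCast numbers.length
  rw [h]
  apply List.pairwise_map.mpr
  exact List.pairwise_lt_range.imp (fun {a b} hab => by exact_mod_cast hab)

theorem countAfter_eq (numbers : List Int) (x v : Int) (hv : 0 ≤ v)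
    (hvn : v < PySem.List.len numbers) :
    countAfter
      ((PySem.List.enumerate numbers).foldl
        (fun d p => d.modify p.2 [] (fun l => l ++ [p.1])) PySem.Dict.empty) x v
    = (((PySem.List.pyRange (v + 1) (PySem.List.len numbers)).countP
        (fun k => PySem.List.pyGetD numbers k 0 == x) : Nat) : Int) := by
  set n := PySem.List.len numbers with hn
  set q : Int → Bool := fun k => PySem.List.pyGetD numbers k 0 == x with hq
  set arr : List Int := (PySem.List.pyRange 0 n).filter q with harr
  have hlt : List.Pairwise (· < ·) arr := pairwise_lt_filter_pyRange numbers q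
  have hle : List.Pairwise (· ≤ ·) arr := hlt.imp le_of_lt
  have hsplit : PySem.List.pyRange 0 n
      = PySem.List.pyRange 0 (v + 1) ++ PySem.List.pyRange (v + 1) n :=
    PySem.List.pyRange_one_append 0 (v + 1) n (by omega) (by omega)
  have hB : arr.countP (fun t => decide (v < t))
      = (PySem.List.pyRange (v + 1) n).countP q := by
    rw [harr, List.countP_filter, hsplit, List.countP_append]
    have h0 : (PySem.List.pyRange 0 (v + 1)).countP (fun k => decide (v < k) && q k) = 0 := by
      rw [List.countP_eq_zero]
      intro k hk
      have h2 := (PySem.List.mem_pyRange_one.mp hk).2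
      have h3 : ¬ v < k := by omega
      simp [h3]
    have h1 : (PySem.List.pyRange (v + 1) n).countP (fun k => decide (v < k) && q k)
        = (PySem.List.pyRange (v + 1) n).countP q := by
      apply List.countP_congr
      intro k hk
      have h2 := (PySem.List.mem_pyRange_one.mp hk).1
      have h3 : v < k := by omega
      simp [h3]
    rw [h0, h1, Nat.zero_add]
  rw [← hB]
  unfold countAfter
  rw [getD_buildIndices, ← hn, ← hq, ← harr]
  by_cases he : arr = []
  · simp [he]
  · simp only [he, if_false]
    by_cases hlast : PySem.List.pyGetD arr (-1) 0 ≤ v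
    · have hc0 : arr.countP (fun t => decide (v < t)) = 0 := by
        rw [List.countP_eq_zero]
        intro t ht
        obtain ⟨m, hm, rfl⟩ := List.getElem_of_mem ht
        have hlen : 0 < arr.length := by omega
        rw [pyGetD_neg_one arr he (by omega)] at hlast
        have hmle : arr[m] ≤ arr[arr.length - 1] := by
          rcases Nat.lt_or_ge m (arr.length - 1) with h | h
          · exact (List.pairwise_iff_getElem.mp hle) m (arr.length - 1) (by omega) (by omega) h
          · have hme : m = arr.length - 1 := by omega
            exact le_of_eq (by congr 1)
        simpa using not_lt.mpr (le_trans hmle hlast)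
      simp [hlast, hc0]
    · simp only [hlast, if_false]
      rw [countP_gt_eq arr v hle]
      have hble := (PySem.List.bisectRight_spec arr v hle).1
      by_cases hi : arr.length ≤ PySem.List.bisectRight arr v
      · have heq : arr.length = PySem.List.bisectRight arr v := le_antisymm hi hble
        simp [← heq]
      · simp only [hi, if_false]
        push_cast [Nat.cast_sub hble]
        ring

theorem comb2_sum (g : Int → Int → Int) (b : Int) : ∀ (m : Nat) (a : Int), (b - a).toNat = m →
    ((PySem.List.combinations (PySem.List.pyRange a b) 2).map
      (fun c => match c with | [i, j] => g i j | _ => 0)).sum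
    = ((PySem.List.pyRange a b).map
        (fun i => ((PySem.List.pyRange (i + 1) b).map (g i)).sum)).sum := by
  intro m
  induction m with
  | zero =>
    intro a ha
    have hba : b ≤ a := by omega
    have : PySem.List.pyRange a b = [] := by simp [pysem, hba]
    simp [this]
  | succ m ih =>
    intro a ha
    have hab : a < b := by omega
    rw [PySem.List.pyRange_one_cons hab]
    rw [show (2 : Nat) = 1 + 1 from rfl, PySem.List.combinations_cons_succ,
      PySem.List.combinations_one]
    rw [List.map_append, List.sum_append, List.map_map, List.map_map]
    rw [List.map_cons, List.sum_cons]
    rw [ih (a + 1) (by omega)]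
    simp [Function.comp_def]

theorem solution_eq_alt (numbers : List Int) : solution numbers = solution_alt numbers := by
  show (PySem.List.combinations (PySem.List.pyRange 0 (PySem.List.len numbers)) 2).foldl
      (fun cnt c =>
        match c with
        | [i, j] =>
            cnt + countAfter ((PySem.List.enumerate numbers).foldl
                (fun d p => d.modify p.2 [] (fun l => l ++ [p.1])) PySem.Dict.empty)
              (-(PySem.List.pyGetD numbers i 0 + PySem.List.pyGetD numbers j 0)) j
        | _ => cnt) (0 : Int)
    = (PySem.List.pyRange 0 (PySem.List.len numbers)).foldl (fun cnt i =>
        (PySem.List.pyRange (i + 1) (PySem.List.len numbers)).foldl (fun cnt j =>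
          (PySem.List.pyRange (j + 1) (PySem.List.len numbers)).foldl (fun cnt k =>
            if PySem.List.pyGetD numbers i 0 + PySem.List.pyGetD numbers j 0
                 + PySem.List.pyGetD numbers k 0 = 0 then cnt + 1 else cnt) cnt) cnt) (0 : Int)
  set n := PySem.List.len numbers with hn
  set idx := (PySem.List.enumerate numbers).foldl
      (fun d p => d.modify p.2 [] (fun l => l ++ [p.1]))
      (PySem.Dict.empty : PySem.Dict Int (List Int)) with hidx
  set g : Int → Int → Int := fun i j => countAfter idx
      (-(PySem.List.pyGetD numbers i 0 + PySem.List.pyGetD numbers j 0)) j with hg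
  -- A side: the fold body is cnt + (match …)
  have hbody : (fun (cnt : Int) (c : List Int) =>
      match c with
      | [i, j] => cnt + g i j
      | _ => cnt)
      = (fun (cnt : Int) (c : List Int) =>
          cnt + (match c with | [i, j] => g i j | _ => 0)) := by
    funext cnt c
    match c with
    | [] => simp
    | [i] => simp
    | [i, j] => rfl
    | i :: j :: k :: t => simp
  rw [hbody, PySem.List.foldl_add, comb2_sum _ n (n - 0).toNat 0 rfl, zero_add]
  -- B side: innermost fold is a count, middle/outer folds are sums
  have hinner : ∀ (i j cnt : Int),
      (PySem.List.pyRange (j + 1) n).foldl (fun cnt k =>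
        if PySem.List.pyGetD numbers i 0 + PySem.List.pyGetD numbers j 0
             + PySem.List.pyGetD numbers k 0 = 0 then cnt + 1 else cnt) cnt
      = cnt + (((PySem.List.pyRange (j + 1) n).countP (fun k =>
          decide (PySem.List.pyGetD numbers i 0 + PySem.List.pyGetD numbers j 0
             + PySem.List.pyGetD numbers k 0 = 0)) : Nat) : Int) := by
    intro i j cnt
    rw [show (fun (cnt k : Int) =>
        if PySem.List.pyGetD numbers i 0 + PySem.List.pyGetD numbers j 0
             + PySem.List.pyGetD numbers k 0 = 0 then cnt + 1 else cnt)
      = (fun (cnt k : Int) =>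
          if (fun k => decide (PySem.List.pyGetD numbers i 0 + PySem.List.pyGetD numbers j 0
             + PySem.List.pyGetD numbers k 0 = 0)) k = true then cnt + 1 else cnt) from by
        funext cnt k; simp]
    exact PySem.List.foldl_count_if _ _ _
  rw [show (fun (cnt i : Int) =>
        (PySem.List.pyRange (i + 1) n).foldl (fun cnt j =>
          (PySem.List.pyRange (j + 1) n).foldl (fun cnt k =>
            if PySem.List.pyGetD numbers i 0 + PySem.List.pyGetD numbers j 0
                 + PySem.List.pyGetD numbers k 0 = 0 then cnt + 1 else cnt) cnt) cnt)
      = (fun cnt i => cnt + ((PySem.List.pyRange (i + 1) n).map (fun j =>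
          (((PySem.List.pyRange (j + 1) n).countP (fun k =>
            decide (PySem.List.pyGetD numbers i 0 + PySem.List.pyGetD numbers j 0
               + PySem.List.pyGetD numbers k 0 = 0)) : Nat) : Int))).sum) from by
        funext cnt i
        rw [show (fun (cnt j : Int) =>
            (PySem.List.pyRange (j + 1) n).foldl (fun cnt k =>
              if PySem.List.pyGetD numbers i 0 + PySem.List.pyGetD numbers j 0
                   + PySem.List.pyGetD numbers k 0 = 0 then cnt + 1 else cnt) cnt)
          = (fun cnt j => cnt + (((PySem.List.pyRange (j + 1) n).countP (fun k =>
              decide (PySem.List.pyGetD numbers i 0 + PySem.List.pyGetD numbers j 0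
                 + PySem.List.pyGetD numbers k 0 = 0)) : Nat) : Int)) from by
            funext cnt j; exact hinner i j cnt]
        rw [PySem.List.foldl_add]]
  rw [PySem.List.foldl_add, zero_add]
  -- now both sides are nested map-sums; compare pointwise
  apply congrArg List.sum
  apply List.map_congr_left
  intro i hi
  apply congrArg List.sum
  apply List.map_congr_left
  intro j hj
  have hi0 : 0 ≤ i := (PySem.List.mem_pyRange_one.mp hi).1
  have hj1 := (PySem.List.mem_pyRange_one.mp hj).1
  have hj2 := (PySem.List.mem_pyRange_one.mp hj).2
  rw [hg]
  beta_reduce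
  rw [hidx]
  rw [countAfter_eq numbers _ j (by omega) (by omega : j < PySem.List.len numbers), ← hn]
  congr 1
  apply List.countP_congr
  intro k _
  simp only [beq_iff_eq, decide_eq_true_eq]
  constructor <;> (intro h; omega)

-- ===== VERDICT (by name: the statement is the Claim_ definition above) =====
theorem solution_spec : Claim_equal_solution := by
  intro numbers _
  exact solution_eq_alt numbers
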